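-- pv_equiv track=rewrite | github.com/JackDaihanZhang/Linear-size-formulations-for-connected-planar-graph-partitioning-and-political-districting | Hess.py | most_possible_nodes_in_one_district
-- ===== SOURCE A (Python) =====
-- def most_possible_nodes_in_one_district(population, U):
--     cumulative_population = 0
--     num_nodes = 0
--     for ipopulation in sorted(population.values()):
--         cumulative_population += ipopulation
--         num_nodes += 1
--         if cumulative_population > U:
--             return num_nodes - 1
-- ===== SOURCE B (Python) =====
-- def most_possible_nodes_in_one_district(population, U):
--     # Selection approach: no sort; repeatedly extract the minimum remaining
--     # population while a decreasing budget stays nonnegative.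
--     vals = list(population.values())
--     budget = U
--     count = 0
--     while vals:
--         m = min(vals)
--         vals.remove(m)
--         count += 1
--         budget -= m
--         if budget < 0:
--             return count - 1
-- ===== Notes on version B (the rewrite author's own statement) =====
-- stated objective: alternative
-- what changed: B drops the sort entirely: it repeatedly extracts the minimum remaining value (min + remove) while counting down a budget U, stopping when the budget goes negative, instead of A's sorted()-then-scan with a growing cumulative sum.
import Mathlib
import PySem

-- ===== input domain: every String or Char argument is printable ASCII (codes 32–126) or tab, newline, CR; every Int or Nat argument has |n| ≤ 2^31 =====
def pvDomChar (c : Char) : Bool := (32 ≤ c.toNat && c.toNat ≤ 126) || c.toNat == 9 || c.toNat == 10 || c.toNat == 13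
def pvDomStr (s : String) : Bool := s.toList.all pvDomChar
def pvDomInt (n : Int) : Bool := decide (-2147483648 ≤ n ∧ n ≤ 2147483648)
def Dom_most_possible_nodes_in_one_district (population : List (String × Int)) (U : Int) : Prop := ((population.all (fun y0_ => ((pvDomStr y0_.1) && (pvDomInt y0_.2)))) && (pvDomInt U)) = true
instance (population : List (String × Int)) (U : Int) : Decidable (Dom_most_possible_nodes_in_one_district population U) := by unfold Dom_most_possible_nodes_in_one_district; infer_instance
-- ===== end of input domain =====

-- B replaces A's sort-then-scan with repeated min-extraction (selection) driven by a decreasing budget; alternative decomposition, no sort pass.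


-- ===== PORT A =====
-- the for-loop of A: running cumulative population and node count, early return on exceeding U
def pvLoopA (U : Int) : List Int → Int → Int → Option Int
  | [], _, _ => none
  | v :: rest, cum, n =>
      let cum' := cum + v
      let n' := n + 1
      if cum' > U then some (n' - 1) else pvLoopA U rest cum' n'

def most_possible_nodes_in_one_district (population : List (String × Int)) (U : Int) : Option Int :=
  pvLoopA U (PySem.List.sorted (population.map Prod.snd) (fun x => x) false) 0 0

-- ===== PORT B =====
-- B's while-loop: min(vals) / vals.remove(m) selection, budget countdown; the 'none' arms of
-- min?/remove? are unreachable (the list is nonempty and the minimum is a member).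
def pvLoopB (U : Int) (vals : List Int) (budget cnt : Int) : Option Int :=
  match vals with
  | [] => none
  | v :: rest =>
    match PySem.List.min? (v :: rest) (fun x => x) with
    | none => none
    | some m =>
      match h : PySem.List.remove? (v :: rest) m with
      | none => none
      | some vals' =>
        let cnt' := cnt + 1
        let budget' := budget - m
        if budget' < 0 then some (cnt' - 1) else pvLoopB U vals' budget' cnt'
termination_by vals.length
decreasing_by
  have hm : m ∈ v :: rest := by
    by_contra hm
    rw [(PySem.List.remove?_eq_none_iff _ _).mpr hm] at h
    simp at h
  have h2 : some ((v :: rest).erase m) = some vals' :=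
    (PySem.List.remove?_eq_some_erase _ _ hm).symm.trans h
  have h3 : vals' = (v :: rest).erase m := (Option.some.injEq _ _ ▸ h2).symm
  have h4 := List.length_erase_of_mem hm
  have h5 : 0 < (v :: rest).length := by simp
  rw [h3, h4]
  omega

def most_possible_nodes_in_one_district_alt (population : List (String × Int)) (U : Int) : Option Int :=
  pvLoopB U (population.map Prod.snd) U 0

-- ===== PRECONDITION & SPEC =====
def Spec_most_possible_nodes_in_one_district (population : List (String × Int)) (U : Int) (out : Option Int) : Prop := out = most_possible_nodes_in_one_district_alt population U
instance (population : List (String × Int)) (U : Int) (out : Option Int) : Decidable (Spec_most_possible_nodes_in_one_district population U out) := by unfold Spec_most_possible_nodes_in_one_district; infer_instance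

-- ===== CLAIM =====
def Claim_equal_most_possible_nodes_in_one_district : Prop := ∀ (population : List (String × Int)) (U : Int), Dom_most_possible_nodes_in_one_district population U → Spec_most_possible_nodes_in_one_district population U (most_possible_nodes_in_one_district population U)

-- ===== LEMMAS AND PROOFS =====
-- sorted(l) starts with the first minimum of l and continues with sorted(l.erase min)
theorem sorted_cons_min (l : List Int) (m : Int) (hmin : PySem.List.min? l (fun x => x) = some m) :
    PySem.List.sorted l (fun x => x) false = m :: PySem.List.sorted (l.erase m) (fun x => x) false := by
  have hm : m ∈ l := PySem.List.min?_mem hmin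
  have hle : ∀ y ∈ l, m ≤ y := by
    intro y hy
    exact PySem.List.min?_isMin (key := fun x : Int => x) hmin y hy
  refine PySem.List.sorted_id_eq_of_perm_of_pairwise l (m :: PySem.List.sorted (l.erase m) (fun x => x) false) ?_ ?_
  · exact ((PySem.List.sorted_perm _ _ _).cons m).trans (List.perm_cons_erase hm).symm
  · rw [List.pairwise_cons]
    constructor
    · intro y hy
      exact hle y (l.erase_subset (((PySem.List.mem_sorted _ _ _ _).mp hy)))
    · simpa using PySem.List.sorted_pairwise (xs := l.erase m) (key := fun x => x)

-- the selection loop equals A's scan of the sorted list, with budget = U - cum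
theorem pvLoopB_eq_pvLoopA (U : Int) (l : List Int) (cum cnt : Int) :
    pvLoopB U l (U - cum) cnt = pvLoopA U (PySem.List.sorted l (fun x => x) false) cum cnt := by
  match l with
    | [] => simp [pvLoopB, pvLoopA, PySem.List.sorted]
    | v :: rest =>
      obtain ⟨m, hmin⟩ : ∃ m, PySem.List.min? (v :: rest) (fun x => x) = some m := by
        cases hx : PySem.List.min? (v :: rest) (fun x => x) with
        | none => simp [PySem.List.min?_eq_none_iff] at hx
        | some m => exact ⟨m, rfl⟩
      have hm : m ∈ v :: rest := PySem.List.min?_mem hmin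
      have hrem : PySem.List.remove? (v :: rest) m = some ((v :: rest).erase m) :=
        PySem.List.remove?_eq_some_erase (v :: rest) m hm
      rw [sorted_cons_min _ _ hmin]
      rw [pvLoopB, hmin]
      dsimp only
      split
      case _ hnone =>
        rw [hrem] at hnone
        simp at hnone
      case _ vals' hsome =>
      rw [hrem] at hsome
      injection hsome with hv
      subst hv
      simp only [pvLoopA]
      have hcond : (U - cum - m < 0) = (cum + m > U) := by
        apply propext; omega
      rw [show U - cum - m = U - (cum + m) by ring] at *
      by_cases hc : cum + m > U
      · simp only [if_pos (show U - (cum + m) < 0 by omega), if_pos hc]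
      · rw [if_neg (show ¬ (U - (cum + m) < 0) by omega), if_neg hc]
        exact pvLoopB_eq_pvLoopA U ((v :: rest).erase m) (cum + m) (cnt + 1)
termination_by l.length
decreasing_by
  rw [List.length_erase_of_mem hm]
  simp

-- ===== VERDICT =====
theorem most_possible_nodes_in_one_district_spec : Claim_equal_most_possible_nodes_in_one_district := by
  intro population U _
  unfold Spec_most_possible_nodes_in_one_district
  unfold most_possible_nodes_in_one_district most_possible_nodes_in_one_district_alt
  have h := pvLoopB_eq_pvLoopA U (population.map Prod.snd) 0 0
  rw [show U - 0 = U by ring] at h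
  exact h.symm
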